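-- pv_equiv track=rewrite | github.com/ismailg/dsc-epgg | src/analysis/evaluate_regime_conditional.py | _build_received_pattern
-- ===== SOURCE A (Python) =====
-- from typing import Dict, List, Optional, Tuple
--
-- def _build_received_pattern(
--     agent_id: str,
--     sender_ids: List[str],
--     delivered_messages: Optional[Dict[str, int]],
-- ) -> Tuple[str, int, int]:
--     if delivered_messages is None or len(sender_ids) == 0:
--         return "", 0, 0
--
--     parts = []
--     recv_any_m0 = 0
--     recv_any_m1 = 0
--     for sender_id in sender_ids:
--         if sender_id == agent_id:
--             continue
--         if sender_id not in delivered_messages: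
--             continue
--         token = int(delivered_messages[sender_id])
--         parts.append(f"{sender_id}:{token}")
--         if token == 0:
--             recv_any_m0 = 1
--         elif token == 1:
--             recv_any_m1 = 1
--     return ("|".join(parts) if len(parts) > 0 else "none", recv_any_m0, recv_any_m1)
-- ===== SOURCE B (Python) =====
-- def _build_received_pattern(agent_id, sender_ids, delivered_messages):
--     if delivered_messages is None or len(sender_ids) == 0:
--         return "", 0, 0
--     # build the pattern back-to-front: walk the senders in reverse, prepending pieces
--     pattern = None
--     for s in reversed(sender_ids):
--         if s == agent_id or s not in delivered_messages:
--             continue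
--         piece = f"{s}:{int(delivered_messages[s])}"
--         pattern = piece if pattern is None else piece + "|" + pattern
--     if pattern is None:
--         pattern = "none"
--     # flags from the dict side: scan items once against the set of senders
--     senders = set(sender_ids)
--     m0 = 1 if any(v == 0 for k, v in delivered_messages.items()
--                   if k != agent_id and k in senders) else 0
--     m1 = 1 if any(v == 1 for k, v in delivered_messages.items()
--                   if k != agent_id and k in senders) else 0
--     return pattern, m0, m1
-- ===== Notes on version B (the rewrite author's own statement) =====
-- stated objective: alternative
-- what changed: B builds the pattern string back-to-front by walking reversed(sender_ids) with a string accumulator (no parts list, no join), and computes the two flags by a separate scan over delivered_messages.items() against the set of senders instead of during the sender loop.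
import Mathlib
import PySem

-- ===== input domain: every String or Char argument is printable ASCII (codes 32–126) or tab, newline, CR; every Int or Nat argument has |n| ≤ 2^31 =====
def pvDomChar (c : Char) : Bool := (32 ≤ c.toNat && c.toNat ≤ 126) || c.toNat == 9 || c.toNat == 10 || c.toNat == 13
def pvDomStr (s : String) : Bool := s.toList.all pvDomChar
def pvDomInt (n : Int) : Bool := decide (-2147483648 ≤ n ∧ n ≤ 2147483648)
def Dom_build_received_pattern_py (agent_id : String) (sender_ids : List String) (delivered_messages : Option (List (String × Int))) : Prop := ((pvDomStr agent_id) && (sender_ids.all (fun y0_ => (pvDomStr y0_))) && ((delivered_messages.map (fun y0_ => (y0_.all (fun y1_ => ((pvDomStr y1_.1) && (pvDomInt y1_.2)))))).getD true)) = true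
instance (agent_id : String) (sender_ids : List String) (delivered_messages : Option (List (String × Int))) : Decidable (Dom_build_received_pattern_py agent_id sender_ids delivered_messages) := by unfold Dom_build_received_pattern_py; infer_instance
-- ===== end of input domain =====

-- B builds the pattern back-to-front over reversed(sender_ids) with a string accumulator (no
-- parts list, no join) and derives the two flags by a separate scan of the dict's items
-- against the set of senders; same values, a different decomposition (not claimed faster).


-- ===== PORT A =====
-- A's loop as the obvious structural recursion over sender_ids carrying (parts, recv_any_m0, recv_any_m1)
def brpLoopA (agent_id : String) (d : PySem.Dict String Int) : List String → List String × Int × Int → List String × Int × Int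
  | [], st => st
  | sender_id :: rest, st =>
    brpLoopA agent_id d rest
      (if sender_id == agent_id then st
       else match d.get? sender_id with
         | none => st   -- 'sender_id not in delivered_messages: continue'
         | some token =>
           let parts := st.1 ++ [sender_id ++ ":" ++ PySem.Int.toStr token]
           if token == 0 then (parts, 1, st.2.2)
           else if token == 1 then (parts, st.2.1, 1)
           else (parts, st.2.1, st.2.2))

def build_received_pattern_py (agent_id : String) (sender_ids : List String) (delivered_messages : Option (List (String × Int))) : String × Int × Int :=
  match delivered_messages with
  | none => ("", 0, 0)
  | some dml =>
    if sender_ids.length = 0 then ("", 0, 0)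
    else
      let st := brpLoopA agent_id (PySem.Dict.ofList dml) sender_ids ([], 0, 0)
      ((if st.1.length > 0 then PySem.Str.join "|" st.1 else "none"), st.2.1, st.2.2)

-- ===== PORT B =====
def build_received_pattern_py_alt (agent_id : String) (sender_ids : List String) (delivered_messages : Option (List (String × Int))) : String × Int × Int :=
  match delivered_messages with
  | none => ("", 0, 0)
  | some dml =>
    if sender_ids.length = 0 then ("", 0, 0)
    else
      let d := PySem.Dict.ofList dml
      -- 'for s in reversed(sender_ids): … pattern = piece if pattern is None else piece + "|" + pattern'
      let pat0 : Option String := sender_ids.reverse.foldl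
        (fun acc s =>
          if s == agent_id then acc
          else match d.get? s with
            | none => acc
            | some t => some ((s ++ ":" ++ PySem.Int.toStr t) ++
                (match acc with | none => "" | some r => "|" ++ r))) none
      let pattern := match pat0 with | none => "none" | some r => r
      let senders : PySem.Set String := PySem.Set.ofList sender_ids
      (pattern,
       (if d.items.any (fun kv => kv.1 != agent_id && senders.contains kv.1 && kv.2 == 0) then 1 else 0),
       (if d.items.any (fun kv => kv.1 != agent_id && senders.contains kv.1 && kv.2 == 1) then 1 else 0))

-- ===== PRECONDITION & SPEC =====
def Spec_build_received_pattern_py (agent_id : String) (sender_ids : List String) (delivered_messages : Option (List (String × Int))) (out : String × Int × Int) : Prop := out = build_received_pattern_py_alt agent_id sender_ids delivered_messages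
instance (agent_id : String) (sender_ids : List String) (delivered_messages : Option (List (String × Int))) (out : String × Int × Int) : Decidable (Spec_build_received_pattern_py agent_id sender_ids delivered_messages out) := by unfold Spec_build_received_pattern_py; infer_instance

-- ===== CLAIM (what is proved, stated in full; the proofs are below) =====
def Claim_equal_build_received_pattern_py : Prop := ∀ (agent_id : String) (sender_ids : List String) (delivered_messages : Option (List (String × Int))), Dom_build_received_pattern_py agent_id sender_ids delivered_messages → Spec_build_received_pattern_py agent_id sender_ids delivered_messages (build_received_pattern_py agent_id sender_ids delivered_messages)

-- ===== LEMMAS AND PROOFS =====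

-- the filtered (sender, token) pairs both programs conceptually process, in sender order
def brpPairs (agent_id : String) (d : PySem.Dict String Int) (l : List String) : List (String × Int) :=
  l.filterMap (fun s => if s == agent_id then none else (d.get? s).map (fun t => (s, t)))

def brpFmt (p : String × Int) : String := p.1 ++ ":" ++ PySem.Int.toStr p.2

-- A's loop, characterised against the pair list
theorem brpLoop_eq (agent_id : String) (d : PySem.Dict String Int) :
    ∀ (l : List String) (parts : List String) (m0 m1 : Int),
    brpLoopA agent_id d l (parts, m0, m1)
      = (parts ++ (brpPairs agent_id d l).map brpFmt,
         (if (brpPairs agent_id d l).any (fun p => p.2 == 0) then 1 else m0),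
         (if (brpPairs agent_id d l).any (fun p => p.2 == 1) then 1 else m1)) := by
  intro l
  induction l with
  | nil => intro parts m0 m1; simp [brpLoopA, brpPairs]
  | cons s rest ih =>
    intro parts m0 m1
    rw [brpLoopA]
    by_cases hs : s = agent_id
    · rw [if_pos (by simp [hs]), ih]
      simp [brpPairs, hs]
    · rw [if_neg (by simp [hs])]
      cases hget : d.get? s with
      | none =>
        rw [ih]
        simp [brpPairs, hs, hget]
      | some token =>
        simp only []
        by_cases h0 : token = 0
        · rw [if_pos (by simp [h0]), ih]
          simp [brpPairs, brpFmt, hs, hget, h0]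
        · rw [if_neg (by simp [h0])]
          by_cases h1 : token = 1
          · rw [if_pos (by simp [h1]), ih]
            simp [brpPairs, brpFmt, hs, hget, h1]
          · rw [if_neg (by simp [h1]), ih]
            simp [brpPairs, brpFmt, hs, hget, h0, h1]

-- step of B's back-to-front fold, restricted to the accepted pairs
def brpStepP (p : String × Int) (acc : Option String) : Option String :=
  some (brpFmt p ++ (match acc with | none => "" | some r => "|" ++ r))

-- B's reversed fold equals a foldr of brpStepP over the pair list
theorem brpFold_eq (agent_id : String) (d : PySem.Dict String Int) (l : List String) :
    l.reverse.foldl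
      (fun acc s =>
        if s == agent_id then acc
        else match d.get? s with
          | none => acc
          | some t => some ((s ++ ":" ++ PySem.Int.toStr t) ++
              (match acc with | none => "" | some r => "|" ++ r))) none
    = (brpPairs agent_id d l).foldr brpStepP none := by
  rw [List.foldl_reverse]
  induction l with
  | nil => simp [brpPairs]
  | cons s rest ih =>
    simp only [List.foldr_cons]
    by_cases hs : s = agent_id
    · rw [if_pos (by simp [hs])]
      have hp : brpPairs agent_id d (s :: rest) = brpPairs agent_id d rest := by
        simp [brpPairs, hs]
      rw [hp]; exact ih
    · rw [if_neg (by simp [hs])]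
      cases hget : d.get? s with
      | none =>
        have hp : brpPairs agent_id d (s :: rest) = brpPairs agent_id d rest := by
          simp [brpPairs, hs, hget]
        rw [hp]; exact ih
      | some t =>
        have hp : brpPairs agent_id d (s :: rest) = (s, t) :: brpPairs agent_id d rest := by
          simp [brpPairs, hs, hget]
        rw [hp, List.foldr_cons, ← ih]
        rfl

-- string-level join facts, proved through the Chars layer
theorem brpJoin_singleton (a : String) : PySem.Str.join "|" [a] = a := by
  simp [PySem.Str.join, PySem.Chars.join, List.intercalate]

theorem brpJoin_cons_cons (a b : String) (r : List String) :
    PySem.Str.join "|" (a :: b :: r) = a ++ "|" ++ PySem.Str.join "|" (b :: r) := by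
  apply String.ext
  simp [PySem.Str.join, PySem.Chars.join_cons_cons]

-- the foldr of brpStepP is exactly the "|"-join of the formatted pairs (or none if empty)
theorem brpFoldr_join : ∀ (pairs : List (String × Int)),
    pairs.foldr brpStepP none
      = (if pairs.isEmpty then none else some (PySem.Str.join "|" (pairs.map brpFmt))) := by
  intro pairs
  induction pairs with
  | nil => rfl
  | cons p rest ih =>
    cases rest with
    | nil => simp [brpStepP, brpJoin_singleton]
    | cons q r =>
      simp only [List.foldr_cons] at ih ⊢
      rw [ih]
      simp only [List.isEmpty_cons, Bool.false_eq_true, if_false, List.map_cons]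
      rw [brpJoin_cons_cons]
      simp [brpStepP, String.append_assoc]

-- membership characterisation of the pair list
theorem brpMem_pairs (agent_id : String) (d : PySem.Dict String Int) (l : List String)
    (s : String) (t : Int) :
    (s, t) ∈ brpPairs agent_id d l ↔ s ∈ l ∧ s ≠ agent_id ∧ d.get? s = some t := by
  simp only [brpPairs, List.mem_filterMap]
  constructor
  · rintro ⟨x, hx, hfx⟩
    by_cases hxa : x = agent_id
    · simp [hxa] at hfx
    · simp only [beq_iff_eq, hxa, if_false, Option.map_eq_some_iff] at hfx
      obtain ⟨v, hv, hpair⟩ := hfx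
      cases hpair
      exact ⟨hx, hxa, hv⟩
  · rintro ⟨hmem, hne, hget⟩
    exact ⟨s, hmem, by simp [hne, hget]⟩

-- the flags: any-over-pairs equals B's any-over-items scan (keys of d are unique)
theorem brpFlag_eq (agent_id : String) (d : PySem.Dict String Int) (hnd : d.keys.Nodup)
    (l : List String) (v : Int) :
    (brpPairs agent_id d l).any (fun p => p.2 == v)
      = d.items.any (fun kv => kv.1 != agent_id && (PySem.Set.ofList l).contains kv.1 && kv.2 == v) := by
  rw [Bool.eq_iff_iff]
  simp only [List.any_eq_true, bne_iff_ne, beq_iff_eq, Bool.and_eq_true,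
    PySem.Set.contains, List.contains_eq_mem, decide_eq_true_eq, PySem.Set.mem_ofList]
  constructor
  · rintro ⟨⟨s, t⟩, hmem, hv⟩
    rw [brpMem_pairs] at hmem
    exact ⟨(s, t), PySem.Dict.mem_items_of_get?_eq_some d hmem.2.2,
      ⟨hmem.2.1, hmem.1⟩, hv⟩
  · rintro ⟨⟨s, t⟩, hmem, ⟨hne, hin⟩, hv⟩
    exact ⟨(s, t),
      (brpMem_pairs agent_id d l s t).mpr ⟨hin, hne, PySem.Dict.get?_of_mem_items d hmem hnd⟩, hv⟩

-- ===== VERDICT (by name: the statement is the Claim_ definition above) =====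
theorem build_received_pattern_py_spec : Claim_equal_build_received_pattern_py := by
  intro agent_id sender_ids delivered_messages _
  unfold Spec_build_received_pattern_py build_received_pattern_py build_received_pattern_py_alt
  cases delivered_messages with
  | none => rfl
  | some dml =>
    dsimp only
    by_cases hlen : sender_ids.length = 0
    · rw [if_pos hlen, if_pos hlen]
    · rw [if_neg hlen, if_neg hlen]
      set d := PySem.Dict.ofList dml with hd
      rw [brpLoop_eq agent_id d sender_ids [] 0 0]
      rw [brpFold_eq agent_id d sender_ids, brpFoldr_join]
      have hnd : d.keys.Nodup := PySem.Dict.nodup_keys_ofList dml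
      refine Prod.ext ?_ (Prod.ext ?_ ?_)
      · cases brpPairs agent_id d sender_ids with
        | nil => simp
        | cons p ps =>
          simp only [List.nil_append, List.length_cons, List.isEmpty_cons,
            Bool.false_eq_true, if_false, List.map_cons]
          rw [if_pos (by omega)]
      · rw [brpFlag_eq agent_id d hnd sender_ids 0]
      · rw [brpFlag_eq agent_id d hnd sender_ids 1]
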